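-- pv_equiv track=rewrite | github.com/ricitos2001/conecta-4 | conecta-4-jesus.py | contar_consecutivas
-- ===== SOURCE A (Python) =====
-- def contar_consecutivas(linea, jugador, bloqueo=False):
--     #Contar fichas consecutivas en una linea, considerando la posibilidad de bloquear al oponente
--     contador = 0
--     max_consecutivas = 0
--
--     for ficha in linea:
--         if ficha == jugador:
--             contador += 1
--             max_consecutivas = max(max_consecutivas, contador)
--         elif not bloqueo:
--             contador = 0
--
--     return max_consecutivas
-- ===== SOURCE B (Python) =====
-- def contar_consecutivas(linea, jugador, bloqueo=False):
--     # Total count in blocking mode (A's counter never resets there);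
--     # otherwise scan maximal runs with a two-index sweep.
--     if bloqueo:
--         return sum(1 for f in linea if f == jugador)
--     best = 0
--     i = 0
--     n = len(linea)
--     while i < n:
--         j = i
--         while j < n and linea[j] == linea[i]:
--             j += 1
--         if linea[i] == jugador and j - i > best:
--             best = j - i
--         i = j
--     return best
-- ===== Notes on version B (the rewrite author's own statement) =====
-- stated objective: idiomatic
-- what changed: A's single running-counter-with-reset scan is replaced by two explicit modes: blocking mode returns the plain total count of the player's tokens (A's counter never resets there), and non-blocking mode sweeps maximal runs with a two-index groupby-style loop and keeps the longest matching run.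
import Mathlib
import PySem

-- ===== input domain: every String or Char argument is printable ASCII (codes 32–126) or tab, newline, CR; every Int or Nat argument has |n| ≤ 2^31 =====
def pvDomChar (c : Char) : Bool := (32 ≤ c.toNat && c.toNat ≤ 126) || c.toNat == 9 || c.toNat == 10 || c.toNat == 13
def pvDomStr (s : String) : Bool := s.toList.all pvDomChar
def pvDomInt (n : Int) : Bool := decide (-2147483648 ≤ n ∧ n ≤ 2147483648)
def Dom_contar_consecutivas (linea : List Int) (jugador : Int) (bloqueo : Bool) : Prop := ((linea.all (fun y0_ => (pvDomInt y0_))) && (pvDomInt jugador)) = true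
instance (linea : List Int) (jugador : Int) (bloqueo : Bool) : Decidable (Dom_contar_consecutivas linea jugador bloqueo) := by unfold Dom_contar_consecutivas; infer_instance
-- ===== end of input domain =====

-- B replaces A's running-counter scan: blocking mode becomes a plain total count
-- (A's counter never resets there), non-blocking mode a sweep over maximal runs (objective: idiomatic decomposition).

-- ===== PORT A =====
def contar_consecutivas (linea : List Int) (jugador : Int) (bloqueo : Bool) : Int :=
  (linea.foldl (fun (st : Int × Int) ficha =>
      if ficha = jugador then (st.1 + 1, max st.2 (st.1 + 1))
      else if !bloqueo then (0, st.2)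
      else st) (0, 0)).2

-- ===== PORT B =====
def pvCount (linea : List Int) (jugador : Int) : Int :=
  linea.foldl (fun acc f => if f = jugador then acc + 1 else acc) 0

def pvRunsMax (linea : List Int) (jugador : Int) (best : Int) : Int :=
  match linea with
  | [] => best
  | x :: xs =>
      let len : Int := ((xs.takeWhile (fun y => y = x)).length : Int) + 1
      pvRunsMax (xs.dropWhile (fun y => y = x)) jugador
        (if x = jugador ∧ len > best then len else best)
termination_by linea.length
decreasing_by
  exact Nat.lt_succ_of_le (List.length_dropWhile_le _ _)

def contar_consecutivas_alt (linea : List Int) (jugador : Int) (bloqueo : Bool) : Int :=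
  if bloqueo then pvCount linea jugador else pvRunsMax linea jugador 0

-- ===== PRECONDITION & SPEC =====
def Spec_contar_consecutivas (linea : List Int) (jugador : Int) (bloqueo : Bool) (out : Int) : Prop := out = contar_consecutivas_alt linea jugador bloqueo
instance (linea : List Int) (jugador : Int) (bloqueo : Bool) (out : Int) : Decidable (Spec_contar_consecutivas linea jugador bloqueo out) := by unfold Spec_contar_consecutivas; infer_instance

-- ===== CLAIM (what is proved, stated in full; the proofs are below) =====
def Claim_equal_contar_consecutivas : Prop := ∀ (linea : List Int) (jugador : Int) (bloqueo : Bool), Dom_contar_consecutivas linea jugador bloqueo → Spec_contar_consecutivas linea jugador bloqueo (contar_consecutivas linea jugador bloqueo)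

-- ===== LEMMAS AND PROOFS =====

-- A's fold step, specialised
def pvStep (jugador : Int) (bloqueo : Bool) : Int × Int → Int → Int × Int :=
  fun st ficha =>
    if ficha = jugador then (st.1 + 1, max st.2 (st.1 + 1))
    else if !bloqueo then (0, st.2)
    else st

theorem pvContar_eq (linea : List Int) (jugador : Int) (bloqueo : Bool) :
    contar_consecutivas linea jugador bloqueo
      = (linea.foldl (pvStep jugador bloqueo) (0, 0)).2 := rfl

theorem pvStep_pos (jugador : Int) (bloqueo : Bool) (st : Int × Int) (f : Int)
    (h : f = jugador) : pvStep jugador bloqueo st f = (st.1 + 1, max st.2 (st.1 + 1)) := by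
  simp [pvStep, h]

theorem pvStep_negF (jugador : Int) (st : Int × Int) (f : Int)
    (h : f ≠ jugador) : pvStep jugador false st f = (0, st.2) := by
  simp [pvStep, h]

theorem pvStep_negT (jugador : Int) (st : Int × Int) (f : Int)
    (h : f ≠ jugador) : pvStep jugador true st f = st := by
  simp [pvStep, h]

-- shifting the accumulator of the count fold
theorem pvCount_shift (jugador : Int) (l : List Int) (a : Int) :
    l.foldl (fun acc f => if f = jugador then acc + 1 else acc) a
      = a + l.foldl (fun acc f => if f = jugador then acc + 1 else acc) 0 := by
  induction l generalizing a with
  | nil => simp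
  | cons x t ih =>
    simp only [List.foldl_cons]
    by_cases h : x = jugador
    · simp only [if_pos h]
      rw [ih (a + 1), ih (0 + 1)]; ring
    · simp only [if_neg h]
      exact ih a

theorem pvCount_cons (jugador x : Int) (t : List Int) :
    pvCount (x :: t) jugador = (if x = jugador then 1 else 0) + pvCount t jugador := by
  simp only [pvCount, List.foldl_cons]
  by_cases h : x = jugador
  · simp only [if_pos h]
    exact pvCount_shift jugador t 1
  · simp [if_neg h]

theorem pvCount_nonneg (jugador : Int) (l : List Int) : 0 ≤ pvCount l jugador := by
  induction l with
  | nil => simp [pvCount]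
  | cons x t ih =>
    rw [pvCount_cons]
    by_cases h : x = jugador <;> simp [h] <;> omega

-- blocking mode: A's fold computes max m (c + count)
theorem pvTrue_fold (jugador : Int) (l : List Int) (c m : Int) (h : c ≤ m) :
    (l.foldl (pvStep jugador true) (c, m)).2 = max m (c + pvCount l jugador) := by
  induction l generalizing c m with
  | nil => simp [pvCount]; omega
  | cons x t ih =>
    rw [List.foldl_cons, pvCount_cons]
    by_cases hx : x = jugador
    · rw [pvStep_pos _ _ _ _ hx, ih (c + 1) (max m (c + 1)) (le_max_right _ _)]
      have := pvCount_nonneg jugador t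
      simp only [if_pos hx]
      omega
    · rw [pvStep_negT _ _ _ hx, ih c m h]
      simp [if_neg hx]

-- elements produced by takeWhile satisfy the predicate (specialised form)
theorem pvTakeWhile_eq (x : Int) (xs : List Int) :
    ∀ y ∈ xs.takeWhile (fun y => y = x), y = x := by
  intro y hy
  have := List.mem_takeWhile_imp hy
  simpa using this

-- non-blocking fold over a run of matching tokens
theorem pvFalse_run (jugador : Int) (t : List Int) (ht : ∀ y ∈ t, y = jugador)
    (c m : Int) (h : c ≤ m) :
    t.foldl (pvStep jugador false) (c, m) = (c + t.length, max m (c + t.length)) := by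
  induction t generalizing c m with
  | nil => simp; omega
  | cons y t ih =>
    rw [List.foldl_cons, pvStep_pos _ _ _ _ (ht y (List.mem_cons_self ..)),
      ih (fun z hz => ht z (List.mem_cons_of_mem _ hz)) (c + 1) (max m (c + 1)) (le_max_right _ _)]
    simp only [List.length_cons, Prod.mk.injEq]
    constructor <;> push_cast <;> [ring; omega]

-- non-blocking fold over a run of non-matching tokens
theorem pvFalse_skip (jugador x : Int) (hx : x ≠ jugador) (t : List Int)
    (ht : ∀ y ∈ t, y = x) (m : Int) :
    t.foldl (pvStep jugador false) (0, m) = (0, m) := by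
  induction t with
  | nil => rfl
  | cons y t ih =>
    rw [List.foldl_cons, pvStep_negF _ _ _ ((ht y (List.mem_cons_self ..)) ▸ hx)]
    exact ih (fun z hz => ht z (List.mem_cons_of_mem _ hz))

-- head of dropWhile fails the predicate
theorem pvDropWhile_head (x y : Int) (xs ys : List Int)
    (h : xs.dropWhile (fun z => z = x) = y :: ys) : y ≠ x := by
  have := List.head?_dropWhile_not (fun z : Int => decide (z = x)) xs
  rw [show (List.dropWhile (fun z : Int => z = x) xs)
        = (List.dropWhile (fun z : Int => decide (z = x)) xs) from rfl] at h
  rw [h] at this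
  simpa using this

-- the non-blocking fold's second component ignores the counter when the list is
-- empty or starts with a non-matching token
theorem pvFalse_start (jugador : Int) (l : List Int)
    (hl : ∀ y ys, l = y :: ys → y ≠ jugador) (c m : Int) :
    (l.foldl (pvStep jugador false) (c, m)).2 = (l.foldl (pvStep jugador false) (0, m)).2 := by
  match l with
  | [] => rfl
  | y :: ys =>
    rw [List.foldl_cons, List.foldl_cons, pvStep_negF _ _ _ (hl y ys rfl),
      pvStep_negF _ _ _ (hl y ys rfl)]

-- non-blocking mode: A's fold from (0, m) equals B's run sweep with best = m
theorem pvFalse_main (jugador : Int) (l : List Int) (m : Int) (hm : 0 ≤ m) :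
    (l.foldl (pvStep jugador false) (0, m)).2 = pvRunsMax l jugador m := by
  match l with
  | [] => simp [pvRunsMax]
  | x :: xs =>
    rw [pvRunsMax]
    have hsplit : x :: xs
        = (x :: xs.takeWhile (fun y => y = x)) ++ xs.dropWhile (fun y => y = x) := by
      rw [List.cons_append, List.takeWhile_append_dropWhile]
    rw [show (x :: xs).foldl (pvStep jugador false) (0, m)
          = (xs.dropWhile (fun y => y = x)).foldl (pvStep jugador false)
              ((x :: xs.takeWhile (fun y => y = x)).foldl (pvStep jugador false) (0, m))
        from by rw [← List.foldl_append, ← hsplit]]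
    have hdrophead : ∀ y ys, xs.dropWhile (fun y => y = x) = y :: ys → y ≠ x :=
      fun y ys h => pvDropWhile_head x y xs ys h
    by_cases hx : x = jugador
    · have hrun : (x :: xs.takeWhile (fun y => y = x)).foldl (pvStep jugador false) (0, m)
          = (((xs.takeWhile (fun y => y = x)).length : Int) + 1,
             max m (((xs.takeWhile (fun y => y = x)).length : Int) + 1)) := by
        rw [List.foldl_cons, pvStep_pos _ _ _ _ hx]
        show (List.foldl (pvStep jugador false) (0 + 1, max m (0 + 1)) _) = _
        rw [pvFalse_run jugador _ (fun y hy => (pvTakeWhile_eq x xs y hy).trans hx)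
            (0 + 1) (max m (0 + 1)) (le_max_right _ _)]
        simp only [Prod.mk.injEq]
        constructor <;> omega
      have hbest : (if x = jugador ∧ ((xs.takeWhile (fun y => y = x)).length : Int) + 1 > m
              then ((xs.takeWhile (fun y => y = x)).length : Int) + 1 else m)
          = max m (((xs.takeWhile (fun y => y = x)).length : Int) + 1) := by
        simp only [hx, true_and]
        split_ifs <;> omega
      rw [hrun, hbest,
        pvFalse_start jugador _ (fun y ys h => (hx ▸ hdrophead y ys h)) _ _]
      exact pvFalse_main jugador (xs.dropWhile (fun y => y = x))
        (max m (((xs.takeWhile (fun y => y = x)).length : Int) + 1))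
        (le_trans hm (le_max_left _ _))
    · have hrun : (x :: xs.takeWhile (fun y => y = x)).foldl (pvStep jugador false) (0, m)
          = (0, m) := by
        rw [List.foldl_cons, pvStep_negF _ _ _ hx]
        exact pvFalse_skip jugador x hx _ (pvTakeWhile_eq x xs) m
      have hbest : (if x = jugador ∧ ((xs.takeWhile (fun y => y = x)).length : Int) + 1 > m
              then ((xs.takeWhile (fun y => y = x)).length : Int) + 1 else m) = m := by
        simp [hx]
      rw [hrun, hbest]
      exact pvFalse_main jugador (xs.dropWhile (fun y => y = x)) m hm
termination_by l.length
decreasing_by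
  all_goals exact Nat.lt_succ_of_le (List.length_dropWhile_le _ _)

-- ===== VERDICT (by name: the statement is the Claim_ definition above) =====
theorem contar_consecutivas_spec : Claim_equal_contar_consecutivas := by
  intro linea jugador bloqueo _
  unfold Spec_contar_consecutivas contar_consecutivas_alt
  rw [pvContar_eq]
  cases bloqueo with
  | true =>
    rw [pvTrue_fold jugador linea 0 0 le_rfl]
    have := pvCount_nonneg jugador linea
    show max 0 (0 + pvCount linea jugador) = pvCount linea jugador
    omega
  | false =>
    rw [pvFalse_main jugador linea 0 le_rfl]
    simp
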